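-- pv_equiv track=rewrite | github.com/dariomx/topcoder-srm | leetcode/trd-pass/medium/sequence-reconstruction/sequence-reconstruction.py | getRelation
-- ===== SOURCE A (Python) =====
-- def getRelation(seqs, refSeq=None):
--     if refSeq:
--         refSeq = {x: i for (i, x) in enumerate(refSeq)}
--     rel = set()
--     for seq in seqs:
--         m = len(seq)
--         for i in range(m):
--             x = seq[i]
--             if refSeq and x not in refSeq:
--                 return None
--             if i == m - 1:
--                 break
--             y = seq[i + 1]
--             if refSeq and y not in refSeq:
--                 return None
--             if x == y or (refSeq and refSeq[x] > refSeq[y]):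
--                 return None
--             else:
--                 rel.add((x, y))
--     return rel
-- ===== SOURCE B (Python) =====
-- def getRelation(seqs, refSeq=None):
--     if refSeq:
--         pos = {x: i for i, x in enumerate(refSeq)}
--         if any(x not in pos for seq in seqs for x in seq):
--             return None
--         if any(x == y or pos[x] > pos[y] for seq in seqs for x, y in zip(seq, seq[1:])):
--             return None
--     else:
--         if any(x == y for seq in seqs for x, y in zip(seq, seq[1:])):
--             return None
--     return {(x, y) for seq in seqs for x, y in zip(seq, seq[1:])}
-- ===== Notes on version B (the rewrite author's own statement) =====
-- stated objective: simpler
-- what changed: Replaces A's single stateful index loop with early returns and an accumulated set by a fully declarative formulation: three whole-input any()/comprehension passes (global membership check, global adjacent-pair-order check, then a set comprehension rebuilding all pairs), with no loop state or early exit threaded through sequences.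
import Mathlib
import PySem

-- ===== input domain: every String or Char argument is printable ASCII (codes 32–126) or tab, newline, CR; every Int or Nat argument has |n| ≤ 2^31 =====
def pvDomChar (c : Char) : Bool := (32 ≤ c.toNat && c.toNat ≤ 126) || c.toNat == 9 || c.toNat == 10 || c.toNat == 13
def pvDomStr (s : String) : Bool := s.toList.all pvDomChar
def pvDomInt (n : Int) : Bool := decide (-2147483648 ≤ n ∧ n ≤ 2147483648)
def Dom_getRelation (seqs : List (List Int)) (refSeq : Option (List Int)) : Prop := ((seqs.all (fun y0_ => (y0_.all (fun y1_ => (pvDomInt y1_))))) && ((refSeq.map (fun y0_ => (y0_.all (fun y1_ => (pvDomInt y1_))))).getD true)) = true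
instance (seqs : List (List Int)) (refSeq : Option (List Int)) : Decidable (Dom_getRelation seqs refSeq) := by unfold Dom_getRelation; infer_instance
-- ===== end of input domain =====

-- B replaces A's stateful early-return index loop by three declarative whole-input passes plus a comprehension (same cost; return-value equivalence proved below).

-- ===== PORT A =====
-- shared prelude of both Pythons: 'if refSeq: refSeq = {x: i for (i, x) in enumerate(refSeq)}'
-- 'none' models a falsy refSeq (None or []), in which case every 'refSeq and …' guard is False.
def pvMkRef (refSeq : Option (List Int)) : Option (PySem.Dict Int Int) :=
  match refSeq with
  | none => none
  | some l =>
      if l.isEmpty then none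
      else some ((PySem.List.enumerate l).foldl (fun d p => d.insert p.2 (p.1 : Int)) PySem.Dict.empty)

-- 'refSeq and x not in refSeq'
def pvMissing (rd : Option (PySem.Dict Int Int)) (x : Int) : Bool :=
  match rd with
  | none => false
  | some d => !d.contains x

-- 'refSeq and refSeq[x] > refSeq[y]' — evaluated only after membership of x and y was checked,
-- so getD never actually hits its default (exact where Python would not raise KeyError).
def pvGt (rd : Option (PySem.Dict Int Int)) (x y : Int) : Bool :=
  match rd with
  | none => false
  | some d => decide (d.getD x 0 > d.getD y 0)

-- A's inner 'for i in range(m)' loop: at index i it reads x = seq[i] and y = seq[i+1],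
-- breaking at i = m-1 — transcribed as structural recursion on the same suffix of seq.
def aSeqLoop (rd : Option (PySem.Dict Int Int)) : List Int → PySem.Set (Int × Int) → Option (PySem.Set (Int × Int))
  | [], rel => some rel
  | [x], rel => if pvMissing rd x then none else some rel       -- last index: check x, then break
  | x :: y :: rest, rel =>
      if pvMissing rd x then none
      else if pvMissing rd y then none
      else if x == y || pvGt rd x y then none
      else aSeqLoop rd (y :: rest) (PySem.Set.add rel (x, y))

-- A's outer 'for seq in seqs' loop with early 'return None'
def aOuter (rd : Option (PySem.Dict Int Int)) : List (List Int) → PySem.Set (Int × Int) → Option (PySem.Set (Int × Int))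
  | [], rel => some rel
  | seq :: rest, rel =>
      match aSeqLoop rd seq rel with
      | none => none
      | some rel' => aOuter rd rest rel'

def getRelation (seqs : List (List Int)) (refSeq : Option (List Int)) : Option (List (Int × Int)) :=
  aOuter (pvMkRef refSeq) seqs PySem.Set.empty

-- ===== PORT B =====
-- zip(seq, seq[1:]) : the consecutive pairs of a sequence
def pvPairs (seq : List Int) : List (Int × Int) :=
  seq.zip (PySem.List.slice seq (some 1) none)

-- 'any(x not in pos for seq in seqs for x in seq)'
def bBadMem (d : PySem.Dict Int Int) (seqs : List (List Int)) : Bool :=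
  seqs.any (fun s => s.any (fun x => !d.contains x))

-- 'any(x == y or pos[x] > pos[y] for seq in seqs for x, y in zip(seq, seq[1:]))'
-- (getD is safe: this is only consulted after the global membership pass succeeded)
def bBadOrd (d : PySem.Dict Int Int) (seqs : List (List Int)) : Bool :=
  seqs.any (fun s => (pvPairs s).any (fun p => p.1 == p.2 || decide (d.getD p.1 0 > d.getD p.2 0)))

-- 'any(x == y for seq in seqs for x, y in zip(seq, seq[1:]))'
def bBadEq (seqs : List (List Int)) : Bool :=
  seqs.any (fun s => (pvPairs s).any (fun p => p.1 == p.2))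

-- '{(x, y) for seq in seqs for x, y in zip(seq, seq[1:])}'
def bBuild (seqs : List (List Int)) : PySem.Set (Int × Int) :=
  seqs.foldl (fun rel s => (pvPairs s).foldl (fun r p => PySem.Set.add r p) rel) PySem.Set.empty

def getRelation_alt (seqs : List (List Int)) (refSeq : Option (List Int)) : Option (List (Int × Int)) :=
  match pvMkRef refSeq with
  | some d =>
      if bBadMem d seqs then none
      else if bBadOrd d seqs then none
      else some (bBuild seqs)
  | none =>
      if bBadEq seqs then none
      else some (bBuild seqs)

-- ===== PRECONDITION & SPEC =====
def Spec_getRelation (seqs : List (List Int)) (refSeq : Option (List Int)) (out : Option (List (Int × Int))) : Prop := out = getRelation_alt seqs refSeq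
instance (seqs : List (List Int)) (refSeq : Option (List Int)) (out : Option (List (Int × Int))) : Decidable (Spec_getRelation seqs refSeq out) := by unfold Spec_getRelation; infer_instance

-- ===== CLAIM (what is proved, stated in full; the proofs are below) =====
def Claim_equal_getRelation : Prop := ∀ (seqs : List (List Int)) (refSeq : Option (List Int)), Dom_getRelation seqs refSeq → Spec_getRelation seqs refSeq (getRelation seqs refSeq)

-- ===== LEMMAS AND PROOFS =====

-- proof-only helpers: per-sequence 'some element missing' and 'bad pair' tests
def missB (rd : Option (PySem.Dict Int Int)) (s : List Int) : Bool :=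
  match rd with
  | none => false
  | some d => s.any (fun x => !d.contains x)

def badP (rd : Option (PySem.Dict Int Int)) (p : Int × Int) : Bool :=
  p.1 == p.2 || pvGt rd p.1 p.2

theorem pvPairs_eq (s : List Int) : pvPairs s = s.zip s.tail := by
  unfold pvPairs; rw [PySem.List.slice_from_one]

-- A's inner loop, characterised: it returns none iff the sequence has a missing
-- element or a bad consecutive pair, else it adds all consecutive pairs to rel.
theorem aSeqLoop_char (rd : Option (PySem.Dict Int Int)) (seq : List Int) (rel : PySem.Set (Int × Int)) :
    aSeqLoop rd seq rel =
      if missB rd seq || (pvPairs seq).any (badP rd) then none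
      else some ((pvPairs seq).foldl (fun r p => PySem.Set.add r p) rel) := by
  rw [pvPairs_eq]
  induction seq generalizing rel with
  | nil => cases rd <;> simp [aSeqLoop, missB]
  | cons x tl ih =>
    cases tl with
    | nil =>
      cases rd with
      | none => simp [aSeqLoop, missB, pvMissing]
      | some d =>
        simp only [aSeqLoop, pvMissing, missB, List.tail_cons, List.zip_nil_right,
          List.any_nil, Bool.or_false, List.any_cons, List.foldl_nil]
        by_cases h : d.contains x = true <;> simp [h]
    | cons y rest =>
      cases rd with
      | none =>
        have hbp : badP none (x, y) = (x == y || pvGt none x y) := rfl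
        simp only [aSeqLoop, pvMissing, missB, List.tail_cons, List.zip_cons_cons, List.any_cons,
          List.foldl_cons, Bool.false_or]
        by_cases hb : (x == y || pvGt none x y) = true
        · simp [hb, hbp]
        · have hb' : (x == y || pvGt none x y) = false := by simpa using hb
          rw [if_neg hb, ih, hbp, hb']
          simp [missB]
      | some d =>
        have hbp : badP (some d) (x, y) = (x == y || pvGt (some d) x y) := rfl
        simp only [aSeqLoop, pvMissing, missB, List.tail_cons, List.zip_cons_cons, List.any_cons,
          List.foldl_cons]
        by_cases hx : d.contains x = true
        · by_cases hy : d.contains y = true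
          · by_cases hb : (x == y || pvGt (some d) x y) = true
            · simp [hx, hy, hb, hbp]
            · have hb' : (x == y || pvGt (some d) x y) = false := by simpa using hb
              rw [if_neg (by simp [hx]), if_neg (by simp [hy]), if_neg hb, ih, hbp, hb']
              simp only [missB, List.any_cons, List.tail_cons, hx, hy, Bool.not_true, Bool.false_or]
          · have hy' : d.contains y = false := by simpa using hy
            simp [hx, hy']
        · have hx' : d.contains x = false := by simpa using hx
          simp [hx']

-- A's outer loop, characterised globally
theorem aOuter_char (rd : Option (PySem.Dict Int Int)) (seqs : List (List Int)) (rel : PySem.Set (Int × Int)) :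
    aOuter rd seqs rel =
      if seqs.any (fun s => missB rd s || (pvPairs s).any (badP rd)) then none
      else some (seqs.foldl (fun r s => (pvPairs s).foldl (fun t p => PySem.Set.add t p) r) rel) := by
  induction seqs generalizing rel with
  | nil => simp [aOuter]
  | cons s rest ih =>
    simp only [aOuter, aSeqLoop_char, List.any_cons, List.foldl_cons]
    by_cases h : (missB rd s || (pvPairs s).any (badP rd)) = true
    · simp [h]
    · have h' : (missB rd s || (pvPairs s).any (badP rd)) = false := by simpa using h
      rw [h', Bool.false_or, if_neg (by simp)]
      exact ih _

theorem any_or_split {α : Type} (l : List α) (f g : α → Bool) :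
    l.any (fun a => f a || g a) = (l.any f || l.any g) := by
  induction l with
  | nil => rfl
  | cons a t ih =>
    simp [List.any_cons, ih, Bool.or_assoc, Bool.or_left_comm]

-- ===== VERDICT (by name: the statement is the Claim_ definition above) =====
theorem getRelation_spec : Claim_equal_getRelation := by
  intro seqs refSeq _
  unfold Spec_getRelation getRelation getRelation_alt
  rw [aOuter_char]
  cases hrd : pvMkRef refSeq with
  | none =>
      have hb : badP none = fun p : Int × Int => p.1 == p.2 := by
        funext p; simp [badP, pvGt]
      simp only [missB, hb, Bool.false_or, bBadEq, bBuild]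
  | some d =>
      have hsplit : (seqs.any fun s => missB (some d) s || (pvPairs s).any (badP (some d)))
          = (bBadMem d seqs || bBadOrd d seqs) := by
        rw [any_or_split]; rfl
      rw [hsplit]
      by_cases hm : bBadMem d seqs = true
      · simp [hm]
      · by_cases ho : bBadOrd d seqs = true <;> simp [hm, ho, bBuild]
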